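-- pv_equiv track=rewrite | github.com/nicofirst1/CorpusCompass | annotation_fixer/common/utils.py | remove_independent_vars
-- ===== SOURCE A (Python) =====
-- from typing import Dict, List, Tuple, Any, Optional
--
-- def remove_independent_vars(dependent: Dict[str, Any], independent: Dict[str, Any]):
--     """
--     Remove the independent variables from the dependent variables.
--     check if the values of the independent variables are the same as the dependent variables,
--     if so remove the independent
--     :param dependent: the dependent variables
--     :param independent: the independent variables
--     :return:
--     """
--
--     for k, v in independent.items():
--         # check if any of the values are present in the dependent variables, if so remove from dependent
--
--         v = [v] if not isinstance(v, list) else v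
--         for v2 in v:
--             for k2, v3 in dependent.items():
--                 if v2 in v3:
--                     del dependent[k2]
--                     break
--
--     return dependent
-- ===== SOURCE B (Python) =====
-- def remove_independent_vars(dependent, independent):
--     # Reverse index value -> dependent slots (insertion order) + a removed mask,
--     # instead of rescanning the whole dict per independent value.
--     # Performs the same in-place deletions on `dependent` as the original.
--     index = {}
--     for i, vals in enumerate(dependent.values()):
--         for v in vals:
--             index.setdefault(v, []).append(i)
--     removed = [False] * len(dependent)
--     for v in independent.values():
--         for v2 in (v if isinstance(v, list) else [v]):
--             for i in index.get(v2, ()):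
--                 if not removed[i]:
--                     removed[i] = True
--                     break
--     for k, r in zip(list(dependent), removed):
--         if r:
--             del dependent[k]
--     return dependent
-- ===== Notes on version B (the rewrite author's own statement) =====
-- stated objective: faster
-- what changed: Instead of rescanning the whole dependent dict for each independent value, B precomputes a reverse index value->dependent slots once and keeps a removed-mask, so each independent value only touches its own index bucket.
import Mathlib
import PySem

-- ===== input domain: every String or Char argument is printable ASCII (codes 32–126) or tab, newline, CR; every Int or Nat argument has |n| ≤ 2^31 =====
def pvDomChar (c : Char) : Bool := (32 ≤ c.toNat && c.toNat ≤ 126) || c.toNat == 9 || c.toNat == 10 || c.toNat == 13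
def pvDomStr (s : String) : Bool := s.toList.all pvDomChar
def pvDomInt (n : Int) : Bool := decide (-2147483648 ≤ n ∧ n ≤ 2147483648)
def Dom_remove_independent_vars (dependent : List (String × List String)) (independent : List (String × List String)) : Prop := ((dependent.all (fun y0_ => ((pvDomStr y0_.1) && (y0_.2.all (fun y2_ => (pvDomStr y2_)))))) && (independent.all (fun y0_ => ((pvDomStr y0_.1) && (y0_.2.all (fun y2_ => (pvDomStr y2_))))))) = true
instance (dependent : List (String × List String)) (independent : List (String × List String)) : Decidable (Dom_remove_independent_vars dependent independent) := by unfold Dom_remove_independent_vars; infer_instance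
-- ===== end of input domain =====

-- B replaces A's rescan of the whole dependent dict per independent value by a
-- reverse index value -> dependent slots built once plus a removed-mask (measured
-- faster). The theorem is about the returned value; both Pythons also delete the
-- same keys from `dependent` in place.


-- ===== PORT A =====
-- inner `for k2, v3 in dependent.items(): if v2 in v3: del dependent[k2]; break`
-- (delete the first entry whose value list contains v2; order of the rest is kept)
def rivRemoveFirst (dep : List (String × List String)) (v2 : String) : List (String × List String) :=
  match dep with
  | [] => []
  | (k, vs) :: rest => if vs.contains v2 then rest else (k, vs) :: rivRemoveFirst rest v2

-- `v = [v] if not isinstance(v, list) else v` is the identity here: values are typed List String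
def remove_independent_vars (dependent : List (String × List String)) (independent : List (String × List String)) : List (String × List String) :=
  independent.foldl (fun dep p => p.2.foldl rivRemoveFirst dep) dependent

-- ===== PORT B =====
-- `for i, vals in enumerate(dependent.values()): for v in vals: index.setdefault(v, []).append(i)`
def rivIndex (dependent : List (String × List String)) : PySem.Dict String (List Nat) :=
  (dependent.zipIdx).foldl
    (fun d p => p.1.2.foldl (fun d v => d.modify v [] (fun l => l ++ [p.2])) d)
    PySem.Dict.empty

-- `for i in index.get(v2, ()): if not removed[i]: removed[i] = True; break`
-- (`removed[i]` is exact as getD: every stored index i is < len(removed) by construction)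
def rivScan (mask : List Bool) : List Nat → List Bool
  | [] => mask
  | i :: rest => if mask.getD i false then rivScan mask rest else mask.set i true

-- `zip(list(dependent), removed)` + deletion: keep the entries whose flag is false
def rivKeep : List (String × List String) → List Bool → List (String × List String)
  | [], _ => []
  | _ :: _, [] => []
  | e :: dep, r :: rest => if r then rivKeep dep rest else e :: rivKeep dep rest

def remove_independent_vars_alt (dependent : List (String × List String)) (independent : List (String × List String)) : List (String × List String) :=
  rivKeep dependent
    (independent.foldl
      (fun m p => p.2.foldl (fun m v2 => rivScan m ((rivIndex dependent).getD v2 [])) m)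
      (List.replicate dependent.length false))

-- ===== PRECONDITION & SPEC =====
def Spec_remove_independent_vars (dependent : List (String × List String)) (independent : List (String × List String)) (out : List (String × List String)) : Prop := out = remove_independent_vars_alt dependent independent
instance (dependent : List (String × List String)) (independent : List (String × List String)) (out : List (String × List String)) : Decidable (Spec_remove_independent_vars dependent independent out) := by unfold Spec_remove_independent_vars; infer_instance

-- ===== CLAIM (what is proved, stated in full; the proofs are below) =====
def Claim_equal_remove_independent_vars : Prop := ∀ (dependent : List (String × List String)) (independent : List (String × List String)), Dom_remove_independent_vars dependent independent → Spec_remove_independent_vars dependent independent (remove_independent_vars dependent independent)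

-- ===== LEMMAS AND PROOFS =====

-- position of the first unmarked entry whose value list contains v2
def rivFIdx : List (String × List String) → List Bool → String → Option Nat
  | [], _, _ => none
  | _ :: _, [], _ => none
  | (_, vs) :: dep, b :: mask, v2 =>
    if !b && vs.contains v2 then some 0 else (rivFIdx dep mask v2).map (· + 1)

def rivUpd (mask : List Bool) : Option Nat → List Bool
  | none => mask
  | some i => mask.set i true

-- the (multi)list of slots whose value list contains v2, indices starting at n, ascending
def rivIlist (dep : List (String × List String)) (v2 : String) (n : Nat) : List Nat :=
  (((dep.zipIdx n).flatMap (fun p => p.1.2.map (fun v => (v, p.2)))).filter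
    (fun q => q.1 == v2)).map (fun q => q.2)

theorem rivIndex_getD (dep : List (String × List String)) (v2 : String) :
    (rivIndex dep).getD v2 [] = rivIlist dep v2 0 := by
  unfold rivIndex rivIlist
  rw [show (fun (d : PySem.Dict String (List Nat)) (p : (String × List String) × Nat) =>
        p.1.2.foldl (fun d v => d.modify v [] (fun l => l ++ [p.2])) d)
      = (fun d p => ((fun (v : String) => (v, p.2)) <$> p.1.2).foldl
          (fun d q => d.modify q.1 [] (fun l => l ++ [q.2])) d) from by
        funext d p; simp [List.foldl_map]]
  rw [← List.foldl_flatMap, PySem.Dict.getD_foldl_modify_append]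
  simp

theorem rivIlist_nil (v2 : String) (n : Nat) : rivIlist [] v2 n = [] := by
  simp [rivIlist]

theorem rivIlist_cons (e : String × List String) (dep : List (String × List String))
    (v2 : String) (n : Nat) :
    rivIlist (e :: dep) v2 n
      = List.replicate (e.2.filter (fun v => v == v2)).length n ++ rivIlist dep v2 (n + 1) := by
  simp [rivIlist, List.zipIdx_cons, List.filter_map, List.map_map, Function.comp_def,
    List.map_const']

theorem rivIlist_shift (dep : List (String × List String)) (v2 : String) (n : Nat) :
    rivIlist dep v2 (n + 1) = (rivIlist dep v2 n).map (· + 1) := by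
  induction dep generalizing n with
  | nil => simp [rivIlist_nil]
  | cons e dep ih =>
    rw [rivIlist_cons, rivIlist_cons, ih, List.map_append, List.map_replicate]

theorem rivFIdx_eq_find (dep : List (String × List String)) (mask : List Bool) (v2 : String)
    (hlen : mask.length = dep.length) :
    (rivIlist dep v2 0).find? (fun i => !(mask.getD i false)) = rivFIdx dep mask v2 := by
  induction dep generalizing mask with
  | nil => simp [rivIlist_nil, rivFIdx]
  | cons e dep ih =>
    obtain ⟨b, m, rfl⟩ : ∃ b m, mask = b :: m := by
      cases mask with
      | nil => simp at hlen
      | cons b m => exact ⟨b, m, rfl⟩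
    obtain ⟨k, vs⟩ := e
    rw [rivIlist_cons, rivIlist_shift, List.find?_append, List.find?_map,
        List.find?_replicate]
    have hmap : ((fun i => !((b :: m).getD i false)) ∘ (· + 1))
        = (fun i => !(m.getD i false)) := by
      funext i; simp
    rw [hmap, ih m (by simpa using hlen)]
    by_cases hc : vs.contains v2
    · have hm : v2 ∈ vs := by simpa using hc
      have hne : ¬((vs.filter (fun v => v == v2)).length = 0) := by
        rw [List.length_eq_zero_iff]
        intro h
        have := List.filter_eq_nil_iff.1 h v2 hm
        simp at this
      cases b <;> simp [rivFIdx, hm, hne]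
    · have he : (vs.filter (fun v => v == v2)) = [] := by
        rw [List.filter_eq_nil_iff]
        intro a ha hav
        have : a = v2 := by simpa using hav
        subst this
        exact hc (by simpa using ha)
      have hnm : v2 ∉ vs := by simpa using hc
      simp [rivFIdx, hnm, he]

theorem rivScan_eq_upd (mask : List Bool) (l : List Nat) :
    rivScan mask l = rivUpd mask (l.find? (fun i => !(mask.getD i false))) := by
  induction l with
  | nil => simp [rivScan, rivUpd]
  | cons i rest ih =>
    by_cases h : mask[i]?.getD false = true
    · simp [rivScan, h, ih]
    · simp [rivScan, h, rivUpd]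

theorem rivRemoveFirst_keep (dep : List (String × List String)) (mask : List Bool) (v2 : String) :
    rivRemoveFirst (rivKeep dep mask) v2 = rivKeep dep (rivUpd mask (rivFIdx dep mask v2)) := by
  induction dep generalizing mask with
  | nil => simp [rivKeep, rivRemoveFirst]
  | cons e dep ih =>
    cases mask with
    | nil => simp [rivKeep, rivRemoveFirst, rivFIdx, rivUpd]
    | cons b m =>
      obtain ⟨k, vs⟩ := e
      cases b with
      | true =>
        have hk : rivKeep ((k, vs) :: dep) (true :: m) = rivKeep dep m := by simp [rivKeep]
        have hf : rivFIdx ((k, vs) :: dep) (true :: m) v2 = (rivFIdx dep m v2).map (· + 1) := by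
          simp [rivFIdx]
        rw [hk, hf, ih m]
        cases h : rivFIdx dep m v2 <;> simp [rivUpd, rivKeep, List.set_cons_succ]
      | false =>
        by_cases hc : vs.contains v2
        · have hm : v2 ∈ vs := by simpa using hc
          simp [rivKeep, rivRemoveFirst, rivFIdx, rivUpd, hm]
        · have hnm : v2 ∉ vs := by simpa using hc
          have hk : rivKeep ((k, vs) :: dep) (false :: m) = (k, vs) :: rivKeep dep m := by
            simp [rivKeep]
          have hr : rivRemoveFirst ((k, vs) :: rivKeep dep m) v2
              = (k, vs) :: rivRemoveFirst (rivKeep dep m) v2 := by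
            simp [rivRemoveFirst, hnm]
          have hf : rivFIdx ((k, vs) :: dep) (false :: m) v2
              = (rivFIdx dep m v2).map (· + 1) := by
            simp [rivFIdx, hnm]
          rw [hk, hr, hf, ih m]
          cases h : rivFIdx dep m v2 <;> simp [rivUpd, rivKeep, List.set_cons_succ]

theorem rivScan_length (mask : List Bool) (l : List Nat) :
    (rivScan mask l).length = mask.length := by
  induction l with
  | nil => rfl
  | cons i rest ih =>
    by_cases h : mask[i]?.getD false = true <;> simp [rivScan, h, ih]

theorem rivStep (dependent : List (String × List String)) (mask : List Bool) (v2 : String)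
    (hlen : mask.length = dependent.length) :
    rivRemoveFirst (rivKeep dependent mask) v2
      = rivKeep dependent (rivScan mask ((rivIndex dependent).getD v2 [])) := by
  rw [rivScan_eq_upd, rivIndex_getD, rivFIdx_eq_find dependent mask v2 hlen,
      rivRemoveFirst_keep]

theorem rivInner (dependent : List (String × List String)) (vs : List String) (mask : List Bool)
    (hlen : mask.length = dependent.length) :
    vs.foldl rivRemoveFirst (rivKeep dependent mask)
      = rivKeep dependent (vs.foldl (fun m v2 => rivScan m ((rivIndex dependent).getD v2 [])) mask)
      ∧ (vs.foldl (fun m v2 => rivScan m ((rivIndex dependent).getD v2 [])) mask).length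
          = dependent.length := by
  induction vs generalizing mask with
  | nil => exact ⟨rfl, hlen⟩
  | cons v2 vs ih =>
    have h1 := rivStep dependent mask v2 hlen
    have h2 : (rivScan mask ((rivIndex dependent).getD v2 [])).length = dependent.length := by
      rw [rivScan_length]; exact hlen
    simpa [List.foldl_cons, h1] using ih _ h2

theorem rivOuter (dependent : List (String × List String))
    (ind : List (String × List String)) (mask : List Bool)
    (hlen : mask.length = dependent.length) :
    ind.foldl (fun dep p => p.2.foldl rivRemoveFirst dep) (rivKeep dependent mask)
      = rivKeep dependent (ind.foldl
          (fun m p => p.2.foldl (fun m v2 => rivScan m ((rivIndex dependent).getD v2 [])) m) mask) := by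
  induction ind generalizing mask with
  | nil => rfl
  | cons p ind ih =>
    obtain ⟨h1, h2⟩ := rivInner dependent p.2 mask hlen
    simpa [List.foldl_cons, h1] using ih _ h2

theorem rivKeep_replicate (dep : List (String × List String)) :
    rivKeep dep (List.replicate dep.length false) = dep := by
  induction dep with
  | nil => rfl
  | cons e dep ih => simp [rivKeep, List.replicate_succ, ih]

-- ===== VERDICT (by name: the statement is the Claim_ definition above) =====
theorem remove_independent_vars_spec : Claim_equal_remove_independent_vars := by
  intro dependent independent _
  unfold Spec_remove_independent_vars remove_independent_vars remove_independent_vars_alt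
  conv_lhs => rw [← rivKeep_replicate dependent]
  exact rivOuter dependent independent (List.replicate dependent.length false) (by simp)
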